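-- pv_equiv track=rewrite | github.com/rodu4835/Heroku_App_Deployment | ConsoleWar.py | compareFun
-- ===== SOURCE A (Python) =====
-- def compareFun(p1Card, p2Card, currentPot, p1Deck, p2Deck):
--     if p1Card[1] > p2Card[1]: #if player one has the bigger card, he gets the pot
--         winner = "p1"
--         return winner, currentPot
--     elif p1Card[1] < p2Card[1]: #if player two has the bigger card, he gets the pot
--         winner = "p2"
--         return winner, currentPot
--     elif p1Card[1] == p2Card[1]: # If the cards have the samve value, draw 4 more cards and the 4th card drawn will be checked
--             if len(p1Deck) >= 5 and len(p2Deck) >= 5: # Makes sure the players have at least 5 cards to draw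
--                 for i in range(0, 3):  #Draws 3 cards and puts them into the pot
--                     currentPot.append(p1Deck.pop(0))
--                     currentPot.append(p2Deck.pop(0))
--                 p1Card2 = p1Deck.pop(0) #Draws the remanining 2 cards to be compared for who wins!
--                 p2Card2 = p2Deck.pop(0)
--                 currentPot.extend((p1Card2, p2Card2))
--                 winner, currentPot = compareFun(p1Card2, p2Card2, currentPot, p1Deck, p2Deck) # Runs the compare function recusively
--             else:
--                 if len(p1Deck) > len(p2Deck): #If they do not have 5 cards, this determines who has less cards in their deck
--                     shorterListLen = len(p2Deck)
--                 else:
--                     shorterListLen = len(p1Deck)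
--                 if shorterListLen == 0: #If there is a tie and one player has no cards remaning, the other player wins
--                     if len(p1Deck) > len(p2Deck):
--                         winner = "p1"
--                     else:
--                         winner = "p2"
--                 elif shorterListLen == 1: #If there is a tie and the losing player only has one card, this grabs one card from each deck and compares recusrively
--                     p1Card2 = p1Deck.pop(0)
--                     p2Card2 = p2Deck.pop(0)
--                     currentPot.extend((p1Card2, p2Card2))
--                     winner, currentPot = compareFun(p1Card2, p2Card2, currentPot, p1Deck, p2Deck)
--                 else:
--                     for i in range(0, shorterListLen-1): #If the player has between 2 and 4 cards, this detemines that number and draws however many cards are remaning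
--                         currentPot.append(p1Deck.pop(0)) #minus one
--                         currentPot.append(p2Deck.pop(0))
--                     p1Card2 = p1Deck.pop(0) # This draws the final card for the compare function
--                     p2Card2 = p2Deck.pop(0)
--                     currentPot.extend((p1Card2, p2Card2))
--                     winner, currentPot = compareFun(p1Card2, p2Card2, currentPot, p1Deck, p2Deck) #This runs the compare function recursively
--     return winner, currentPot
-- ===== SOURCE B (Python) =====
-- def compareFun(p1Card, p2Card, currentPot, p1Deck, p2Deck):
--     # Iterative loop; all tie branches collapse to one draw of k = min(4, m) cards per player.
--     while True:
--         if p1Card[1] > p2Card[1]: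
--             return "p1", currentPot
--         if p1Card[1] < p2Card[1]:
--             return "p2", currentPot
--         m = min(len(p1Deck), len(p2Deck))
--         if m == 0:
--             return ("p1" if len(p1Deck) > len(p2Deck) else "p2"), currentPot
--         k = min(4, m)
--         for i in range(k):
--             currentPot.append(p1Deck[i])
--             currentPot.append(p2Deck[i])
--         p1Card, p2Card = p1Deck[k - 1], p2Deck[k - 1]
--         del p1Deck[:k]
--         del p2Deck[:k]
-- ===== Notes on version B (the rewrite author's own statement) =====
-- stated objective: simpler
-- what changed: Replaced the three-way recursive tie handling (decks>=5 / shorter==1 / shorter in 2..4, each with its own pop sequence) by one iterative while-loop that each round draws k = min(4, min(len(p1Deck), len(p2Deck))) cards per player in a single uniform step.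
import Mathlib
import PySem

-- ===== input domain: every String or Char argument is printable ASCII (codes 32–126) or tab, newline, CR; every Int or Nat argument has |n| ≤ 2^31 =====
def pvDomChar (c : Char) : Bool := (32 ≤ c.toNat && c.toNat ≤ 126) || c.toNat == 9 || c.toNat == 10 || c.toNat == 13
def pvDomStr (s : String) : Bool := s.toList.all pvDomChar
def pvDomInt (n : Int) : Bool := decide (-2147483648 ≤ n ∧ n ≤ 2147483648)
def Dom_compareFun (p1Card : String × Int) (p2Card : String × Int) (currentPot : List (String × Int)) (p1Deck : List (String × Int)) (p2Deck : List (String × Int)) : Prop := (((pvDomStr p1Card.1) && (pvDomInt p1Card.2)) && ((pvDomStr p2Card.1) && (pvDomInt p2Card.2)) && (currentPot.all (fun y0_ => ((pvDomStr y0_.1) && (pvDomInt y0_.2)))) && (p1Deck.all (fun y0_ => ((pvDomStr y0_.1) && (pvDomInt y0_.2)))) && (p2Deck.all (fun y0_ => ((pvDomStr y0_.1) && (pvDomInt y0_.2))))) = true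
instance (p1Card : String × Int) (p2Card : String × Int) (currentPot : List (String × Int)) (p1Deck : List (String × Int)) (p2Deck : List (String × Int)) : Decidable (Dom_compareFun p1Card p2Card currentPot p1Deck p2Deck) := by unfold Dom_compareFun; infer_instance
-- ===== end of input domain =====

-- B replaces A's three-way recursive tie handling by one iterative loop drawing k = min(4, min deck lengths)
-- cards per player per round (objective: simpler). Both Pythons mutate currentPot/p1Deck/p2Deck identically
-- (checked by fuzzing); the theorems here are about the return value.

-- ===== PORT A =====
-- deck.pop(0): in A every pop is on a deck proved nonempty by the enclosing branch's length guard,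
-- so the [] case is unreachable; its value is a dummy.
def pvPop (l : List (String × Int)) : (String × Int) × List (String × Int) :=
  match l with
  | [] => (("", 0), [])
  | x :: xs => (x, xs)

@[simp] theorem pvPop_snd_length (l : List (String × Int)) :
    (pvPop l).2.length = l.length - 1 := by cases l <;> simp [pvPop]

-- the 'for i in range(0, n): currentPot.append(p1Deck.pop(0)); currentPot.append(p2Deck.pop(0))' loop
def pvDrawLoop (n : Nat) (pot d1 d2 : List (String × Int)) :
    List (String × Int) × List (String × Int) × List (String × Int) :=
  match n with
  | 0 => (pot, d1, d2)
  | n + 1 =>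
      let (x, d1') := pvPop d1
      let (y, d2') := pvPop d2
      pvDrawLoop n (pot ++ [x, y]) d1' d2'

theorem pvDrawLoop_len1 (n : Nat) (pot d1 d2 : List (String × Int)) :
    (pvDrawLoop n pot d1 d2).2.1.length = d1.length - n := by
  induction n generalizing pot d1 d2 with
  | zero => simp [pvDrawLoop]
  | succ n ih => simp [pvDrawLoop, ih]; omega

def compareFun (p1Card : String × Int) (p2Card : String × Int) (currentPot : List (String × Int)) (p1Deck : List (String × Int)) (p2Deck : List (String × Int)) : String × (List (String × Int)) :=
  if p1Card.2 > p2Card.2 then ("p1", currentPot)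
  else if p1Card.2 < p2Card.2 then ("p2", currentPot)
  else
    if p1Deck.length ≥ 5 ∧ p2Deck.length ≥ 5 then
      let st := pvDrawLoop 3 currentPot p1Deck p2Deck
      let r1 := pvPop st.2.1
      let r2 := pvPop st.2.2
      compareFun r1.1 r2.1 (st.1 ++ [r1.1, r2.1]) r1.2 r2.2
    else
      let shorterListLen :=
        if p1Deck.length > p2Deck.length then p2Deck.length else p1Deck.length
      if shorterListLen = 0 then
        ((if p1Deck.length > p2Deck.length then "p1" else "p2"), currentPot)
      else if shorterListLen = 1 then
        let r1 := pvPop p1Deck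
        let r2 := pvPop p2Deck
        compareFun r1.1 r2.1 (currentPot ++ [r1.1, r2.1]) r1.2 r2.2
      else
        let st := pvDrawLoop (shorterListLen - 1) currentPot p1Deck p2Deck
        let r1 := pvPop st.2.1
        let r2 := pvPop st.2.2
        compareFun r1.1 r2.1 (st.1 ++ [r1.1, r2.1]) r1.2 r2.2
termination_by p1Deck.length
decreasing_by
  all_goals simp only [pvPop_snd_length, pvDrawLoop_len1]
  all_goals try omega
  all_goals simp only [shorterListLen] at *; split_ifs at * <;> omega

-- ===== PORT B =====
def compareFun_alt (p1Card : String × Int) (p2Card : String × Int) (currentPot : List (String × Int)) (p1Deck : List (String × Int)) (p2Deck : List (String × Int)) : String × (List (String × Int)) :=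
  if p1Card.2 > p2Card.2 then ("p1", currentPot)
  else if p1Card.2 < p2Card.2 then ("p2", currentPot)
  else
    let m := min p1Deck.length p2Deck.length
    if m = 0 then
      ((if p1Deck.length > p2Deck.length then "p1" else "p2"), currentPot)
    else
      let k := min 4 m
      -- 'for i in range(k): currentPot.append(p1Deck[i]); currentPot.append(p2Deck[i])'
      -- (indices i < k ≤ length, so getD's default is never used)
      let pot' := (List.range k).foldl
        (fun p i => p ++ [p1Deck.getD i ("", 0), p2Deck.getD i ("", 0)]) currentPot
      compareFun_alt (p1Deck.getD (k - 1) ("", 0)) (p2Deck.getD (k - 1) ("", 0))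
        pot' (p1Deck.drop k) (p2Deck.drop k)
termination_by p1Deck.length
decreasing_by simp; omega

-- ===== PRECONDITION & SPEC =====
def Spec_compareFun (p1Card : String × Int) (p2Card : String × Int) (currentPot : List (String × Int)) (p1Deck : List (String × Int)) (p2Deck : List (String × Int)) (out : String × (List (String × Int))) : Prop := out = compareFun_alt p1Card p2Card currentPot p1Deck p2Deck
instance (p1Card : String × Int) (p2Card : String × Int) (currentPot : List (String × Int)) (p1Deck : List (String × Int)) (p2Deck : List (String × Int)) (out : String × (List (String × Int))) : Decidable (Spec_compareFun p1Card p2Card currentPot p1Deck p2Deck out) := by unfold Spec_compareFun; infer_instance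

-- ===== CLAIM (what is proved, stated in full; the proofs are below) =====
def Claim_equal_compareFun : Prop := ∀ (p1Card : String × Int) (p2Card : String × Int) (currentPot : List (String × Int)) (p1Deck : List (String × Int)) (p2Deck : List (String × Int)), Dom_compareFun p1Card p2Card currentPot p1Deck p2Deck → Spec_compareFun p1Card p2Card currentPot p1Deck p2Deck (compareFun p1Card p2Card currentPot p1Deck p2Deck)

-- ===== LEMMAS AND PROOFS =====

theorem pvDrawLoop_eq (n : Nat) (pot d1 d2 : List (String × Int))
    (h1 : n ≤ d1.length) (h2 : n ≤ d2.length) :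
    pvDrawLoop n pot d1 d2 =
      ((List.range n).foldl
        (fun p i => p ++ [d1.getD i ("", 0), d2.getD i ("", 0)]) pot,
       d1.drop n, d2.drop n) := by
  induction n generalizing pot d1 d2 with
  | zero => simp [pvDrawLoop]
  | succ n ih =>
      cases d1 with
      | nil => simp at h1
      | cons x d1 =>
        cases d2 with
        | nil => simp at h2
        | cons y d2 =>
          simp only [pvDrawLoop, pvPop]
          rw [ih _ d1 d2 (by simpa using h1) (by simpa using h2)]
          rw [List.range_succ_eq_map, List.foldl_cons, List.foldl_map]
          simp

-- the common one-round draw: drawing k-1 pairs by repeated pop followed by one final pop of each deck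
-- equals B's direct indexed reading of the first k cards
theorem pvStep_eq (k : Nat) (pot d1 d2 : List (String × Int))
    (hk : 1 ≤ k) (h1 : k ≤ d1.length) (h2 : k ≤ d2.length) :
    pvPop (pvDrawLoop (k-1) pot d1 d2).2.1 = (d1.getD (k-1) ("",0), d1.drop k) ∧
    pvPop (pvDrawLoop (k-1) pot d1 d2).2.2 = (d2.getD (k-1) ("",0), d2.drop k) ∧
    (pvDrawLoop (k-1) pot d1 d2).1 ++ [d1.getD (k-1) ("",0), d2.getD (k-1) ("",0)] =
      (List.range k).foldl (fun p i => p ++ [d1.getD i ("",0), d2.getD i ("",0)]) pot := by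
  rw [pvDrawLoop_eq (k-1) pot d1 d2 (by omega) (by omega)]
  have e1 : k - 1 < d1.length := by omega
  have e2 : k - 1 < d2.length := by omega
  have hd1 : d1.drop (k-1) = d1[k-1] :: d1.drop k := by
    rw [List.drop_eq_getElem_cons e1, Nat.sub_add_cancel hk]
  have hd2 : d2.drop (k-1) = d2[k-1] :: d2.drop k := by
    rw [List.drop_eq_getElem_cons e2, Nat.sub_add_cancel hk]
  have hk' : (k - 1) + 1 = k := Nat.sub_add_cancel hk
  have hr : List.range k = List.range (k-1) ++ [k-1] := by
    rw [← hk', List.range_succ]; simp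
  refine ⟨?_, ?_, ?_⟩
  · simp [hd1, pvPop, List.getElem?_eq_getElem e1]
  · simp [hd2, pvPop, List.getElem?_eq_getElem e2]
  · rw [hr, List.foldl_append]
    simp [List.getD]

theorem compareFun_eq_alt (p1Card p2Card : String × Int)
    (currentPot p1Deck p2Deck : List (String × Int)) :
    compareFun p1Card p2Card currentPot p1Deck p2Deck =
      compareFun_alt p1Card p2Card currentPot p1Deck p2Deck := by
  fun_induction compareFun p1Card p2Card currentPot p1Deck p2Deck
  case case1 c1 c2 pot d1 d2 hgt =>
    rw [compareFun_alt]; simp [hgt]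
  case case2 c1 c2 pot d1 d2 hgt hlt =>
    rw [compareFun_alt]; simp [hgt, hlt]
  case case3 c1 c2 pot d1 d2 hgt hlt h5 st r1 r2 ih =>
    simp only [st, r1, r2] at ih ⊢
    rw [ih]
    obtain ⟨e1, e2, e3⟩ := pvStep_eq 4 pot d1 d2 (by omega) (by omega) (by omega)
    norm_num at e1 e2 e3
    rw [e1, e2, e3]
    conv_rhs => rw [compareFun_alt]
    have hm0 : ¬ (min d1.length d2.length = 0) := by omega
    have hk4 : min 4 (min d1.length d2.length) = 4 := by omega
    simp only [hgt, hlt, if_false, hk4, hm0]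
    norm_num
  case case4 c1 c2 pot d1 d2 hgt hlt h5 s hs0 =>
    have hs0' : min d1.length d2.length = 0 := by
      simp only [s] at hs0; split at hs0 <;> omega
    rw [compareFun_alt]
    simp only [hgt, hlt, hs0', if_false, if_true]
  case case5 c1 c2 pot d1 d2 hgt hlt h5 s hs0 hs1 r1 r2 ih =>
    have hs1' : min d1.length d2.length = 1 := by
      simp only [s] at hs1; split at hs1 <;> omega
    simp only [r1, r2] at ih ⊢
    rw [ih]
    obtain ⟨e1, e2, -⟩ := pvStep_eq 1 pot d1 d2 (by omega) (by omega) (by omega)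
    norm_num [pvDrawLoop] at e1 e2
    rw [e1, e2]
    conv_rhs => rw [compareFun_alt]
    have hm0 : ¬ (min d1.length d2.length = 0) := by omega
    have hk1 : min 4 (min d1.length d2.length) = 1 := by omega
    simp only [hgt, hlt, hk1, hm0, if_false]
    norm_num
  case case6 c1 c2 pot d1 d2 hgt hlt h5 s hs0 hs1 st r1 r2 ih =>
    have hsmin : s = min d1.length d2.length := by
      simp only [s]; split <;> omega
    have hs2 : 2 ≤ s := by
      rcases Nat.lt_or_ge s 2 with h | h
      · interval_cases s <;> simp_all
      · exact h
    have hs4 : s ≤ 4 := by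
      rw [hsmin]; omega
    simp only [st, r1, r2] at ih ⊢
    rw [ih]
    obtain ⟨e1, e2, e3⟩ := pvStep_eq s pot d1 d2 (by omega) (by omega) (by omega)
    rw [e1, e2, e3]
    conv_rhs => rw [compareFun_alt]
    have hm0 : ¬ (min d1.length d2.length = 0) := by omega
    have hks : min 4 (min d1.length d2.length) = s := by omega
    simp only [hgt, hlt, hks, hm0, if_false, hsmin]

-- ===== VERDICT (by name: the statement is the Claim_ definition above) =====
theorem compareFun_spec : Claim_equal_compareFun := by
  intro c1 c2 pot d1 d2 _
  exact compareFun_eq_alt c1 c2 pot d1 d2
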